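-- pv_equiv track=rewrite | github.com/csv610/CompGeom | src/compgeom/mesh_reordering.py | _cuthill_mckee_core
-- ===== SOURCE A (Python) =====
-- from collections import deque
-- from typing import Dict, List, Set, Tuple
--
-- def _cuthill_mckee_core(n: int, adj: Dict[int, Set[int]], degrees: Dict[int, int], reverse: bool) -> List[int]:
--     permutation = []
--     unvisited = set(range(n))
--
--     while unvisited:
--         # 1. Find starting node (min degree in component)
--         start_node = min(unvisited, key=lambda i: degrees[i])
--
--         # 2. BFS traversal
--         queue = deque([start_node])
--         unvisited.remove(start_node)
--
--         while queue:
--             u = queue.popleft()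
--             permutation.append(u)
--
--             # Neighbors not yet visited, sorted by degree
--             neighbors = sorted(
--                 [v for v in adj[u] if v in unvisited],
--                 key=lambda i: degrees[i]
--             )
--
--             for v in neighbors:
--                 if v in unvisited:
--                     unvisited.remove(v)
--                     queue.append(v)
--
--     if reverse:
--         return list(reversed(permutation))
--     return permutation
-- ===== SOURCE B (Python) =====
-- def _cuthill_mckee_core(n, adj, degrees, reverse):
--     # Pre-sort every adjacency set by degree once (restricted to nodes in range),
--     # and replace the repeated min(unvisited, key=degrees) by one global
--     # degree-sorted start list scanned with a 'seen' set; BFS keeps visited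
--     # ('seen') state instead of an 'unvisited' set and never sorts inside the loop.
--     nbr = {u: sorted((v for v in vs if 0 <= v < n), key=lambda i: degrees[i])
--            for u, vs in adj.items()}
--     starts = sorted(range(n), key=lambda i: degrees[i])
--     seen = set()
--     out = []
--     for s in starts:
--         if s in seen:
--             continue
--         seen.add(s)
--         pending = [s]
--         while pending:
--             u = pending.pop(0)
--             out.append(u)
--             fresh = [v for v in nbr[u] if v not in seen]
--             seen.update(fresh)
--             pending.extend(fresh)
--     return out[::-1] if reverse else out
-- ===== Notes on version B (the rewrite author's own statement) =====
-- stated objective: alternative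
-- what changed: B precomputes a degree-sorted adjacency table once and one global degree-sorted start list scanned with a growing 'seen' set, so the BFS loop does no sorting and there is no unvisited set, no min() call and no deque; A re-sorts the unvisited neighbors at every visit and re-scans the unvisited set with min() per component.
import Mathlib
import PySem

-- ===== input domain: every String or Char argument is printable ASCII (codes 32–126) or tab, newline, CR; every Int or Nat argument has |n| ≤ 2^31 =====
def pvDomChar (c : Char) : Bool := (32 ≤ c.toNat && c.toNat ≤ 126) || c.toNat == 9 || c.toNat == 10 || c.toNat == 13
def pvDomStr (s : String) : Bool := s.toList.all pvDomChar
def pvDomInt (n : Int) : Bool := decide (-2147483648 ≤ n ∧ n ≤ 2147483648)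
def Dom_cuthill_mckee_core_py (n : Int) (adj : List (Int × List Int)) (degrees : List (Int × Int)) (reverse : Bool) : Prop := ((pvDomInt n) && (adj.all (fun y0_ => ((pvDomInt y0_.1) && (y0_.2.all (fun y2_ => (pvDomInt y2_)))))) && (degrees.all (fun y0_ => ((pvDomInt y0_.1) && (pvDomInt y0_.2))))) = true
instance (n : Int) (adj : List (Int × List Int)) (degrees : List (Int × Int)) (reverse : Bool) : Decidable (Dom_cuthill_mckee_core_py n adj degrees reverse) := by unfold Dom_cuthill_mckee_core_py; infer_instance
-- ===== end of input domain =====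

-- B pre-sorts each adjacency list by degree once and scans one global degree-sorted start list with a 'seen' set, replacing A's per-visit neighbor sorts, repeated min() over the unvisited set and deque BFS; equal return values proved on Pre_.


-- Shared accessors: degrees[i] and adj[u] (dict lookups; Pre_ guarantees the keys A looks up are present).
def pvDeg (degrees : List (Int × Int)) (i : Int) : Int := PySem.Dict.getD (PySem.Dict.mk degrees) i 0

def pvAdj (adj : List (Int × List Int)) (u : Int) : List Int := PySem.Dict.getD (PySem.Dict.mk adj) u []

-- ===== PORT A =====
-- 'for v in neighbors: if v in unvisited: unvisited.remove(v); queue.append(v)' (state = (unvisited, queue))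
def pvVisitA (st : List Int × List Int) (vs : List Int) : List Int × List Int :=
  vs.foldl (fun st v => if PySem.Set.contains st.1 v then (PySem.Set.discard st.1 v, st.2 ++ [v]) else st) st

-- inner 'while queue' loop; returns (permutation, unvisited).  The Nat argument is fuel that only
-- makes the recursion structural: each iteration pops one queue node, and (proved below) the queue
-- never outgrows |unvisited|, so the fuel passed at the call site is never exhausted.
def pvBFSA (adj : List (Int × List Int)) (degrees : List (Int × Int)) :
    Nat → List Int → List Int → List Int → List Int × List Int
  | _, [], uv, perm => (perm, uv)
  | 0, _ :: _, uv, perm => (perm, uv)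
  | f + 1, u :: qs, uv, perm =>
    let ns := PySem.List.sorted ((pvAdj adj u).filter (fun v => PySem.Set.contains uv v))
                (fun i => pvDeg degrees i)
    let st := pvVisitA (uv, qs) ns
    pvBFSA adj degrees f st.2 st.1 (perm ++ [u])

-- outer 'while unvisited' loop of A; fuel = |unvisited| suffices since every round removes a node
def pvOuterA (adj : List (Int × List Int)) (degrees : List (Int × Int)) :
    Nat → List Int → List Int → List Int
  | 0, _, perm => perm
  | f + 1, uv, perm =>
    match PySem.List.min? uv (fun i => pvDeg degrees i) with
    | none => perm
    | some s =>
      let uv1 := PySem.Set.discard uv s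
      let r := pvBFSA adj degrees (uv1.length + 2) [s] uv1 perm
      pvOuterA adj degrees f r.2 r.1

def cuthill_mckee_core_py (n : Int) (adj : List (Int × List Int)) (degrees : List (Int × Int)) (reverse : Bool) : List Int :=
  let unvisited := PySem.Set.ofList (PySem.List.pyRange 0 n 1)
  let permutation := pvOuterA adj degrees unvisited.length unvisited []
  if reverse then permutation.reverse else permutation

-- ===== PORT B =====
-- nbr = {u: sorted((v for v in vs if 0 <= v < n), key=degrees) for u, vs in adj.items()}
def pvNbrTab (n : Int) (adj : List (Int × List Int)) (degrees : List (Int × Int)) : List (Int × List Int) :=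
  adj.map (fun p => (p.1, PySem.List.sorted (p.2.filter (fun v => decide (0 ≤ v) && decide (v < n)))
    (fun i => pvDeg degrees i)))

-- nbr[u]
def pvNbrGet (tab : List (Int × List Int)) (u : Int) : List Int :=
  PySem.Dict.getD (PySem.Dict.mk tab) u []

-- 'while pending: u = pending.pop(0); out.append(u); fresh = [v for v in nbr[u] if v not in seen];
--  seen.update(fresh); pending.extend(fresh)'; returns (out, seen).  Fuel only makes the recursion
-- structural; the call site passes n+1, enough since every iteration pops one node and at most n
-- nodes are ever enqueued.
def pvBFS_B (tab : List (Int × List Int)) :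
    Nat → List Int → List Int → List Int → List Int × List Int
  | _, [], seen, out => (out, seen)
  | 0, _ :: _, seen, out => (out, seen)
  | f + 1, u :: rest, seen, out =>
    let fresh := (pvNbrGet tab u).filter (fun v => !PySem.Set.contains seen v)
    pvBFS_B tab f (rest ++ fresh) (PySem.Set.update seen fresh) (out ++ [u])

-- 'for s in starts: if s in seen: continue; seen.add(s); …BFS…'
def pvStartsLoop (tab : List (Int × List Int)) (fuel : Nat) :
    List Int → List Int → List Int → List Int
  | [], _, out => out
  | s :: rest, seen, out =>
    if PySem.Set.contains seen s then pvStartsLoop tab fuel rest seen out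
    else
      let r := pvBFS_B tab fuel [s] (PySem.Set.add seen s) out
      pvStartsLoop tab fuel rest r.2 r.1

def cuthill_mckee_core_py_alt (n : Int) (adj : List (Int × List Int)) (degrees : List (Int × Int)) (reverse : Bool) : List Int :=
  let tab := pvNbrTab n adj degrees
  let starts := PySem.List.sorted (PySem.List.pyRange 0 n 1) (fun i => pvDeg degrees i)
  let out := pvStartsLoop tab (n.toNat + 1) starts [] []
  if reverse then out.reverse else out

-- ===== PRECONDITION & SPEC =====
-- number of distinct keys of a dict that lie in [0, n)
def pvKeysInRange (n : Int) (ks : List Int) : Int :=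
  ((PySem.Set.ofList ks).filter (fun k => decide (0 ≤ k) && decide (k < n))).length

-- Pre_ excludes inputs where Python A raises KeyError (a node 0..n-1 missing from adj or degrees — stated by
-- counting the distinct keys in [0,n), which is "every node is a key" without an O(n) scan), and adjacency
-- lists with duplicates, which do not encode a Python set (adj maps to sets, so every real input has distinct lists).
def Pre_cuthill_mckee_core_py (n : Int) (adj : List (Int × List Int)) (degrees : List (Int × Int)) (reverse : Bool) : Prop :=
  (n ≤ 0 ∨ (pvKeysInRange n (adj.map Prod.fst) = n ∧ pvKeysInRange n (degrees.map Prod.fst) = n))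
  ∧ ∀ p ∈ adj, p.2.Nodup
instance (n : Int) (adj : List (Int × List Int)) (degrees : List (Int × Int)) (reverse : Bool) : Decidable (Pre_cuthill_mckee_core_py n adj degrees reverse) := by unfold Pre_cuthill_mckee_core_py; infer_instance

def pvWitness_cuthill_mckee_core_py : Int × (List (Int × List Int)) × (List (Int × Int)) × Bool :=
  (3, [(0, [1, 2]), (1, [0]), (2, [0])], [(0, 2), (1, 1), (2, 1)], true)

def Spec_cuthill_mckee_core_py (n : Int) (adj : List (Int × List Int)) (degrees : List (Int × Int)) (reverse : Bool) (out : List Int) : Prop := out = cuthill_mckee_core_py_alt n adj degrees reverse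
instance (n : Int) (adj : List (Int × List Int)) (degrees : List (Int × Int)) (reverse : Bool) (out : List Int) : Decidable (Spec_cuthill_mckee_core_py n adj degrees reverse out) := by unfold Spec_cuthill_mckee_core_py; infer_instance

-- ===== CLAIM (what is proved, stated in full; the proofs are below) =====
def Claim_equal_cuthill_mckee_core_py : Prop := ∀ (n : Int) (adj : List (Int × List Int)) (degrees : List (Int × Int)) (reverse : Bool), Dom_cuthill_mckee_core_py n adj degrees reverse → Pre_cuthill_mckee_core_py n adj degrees reverse → Spec_cuthill_mckee_core_py n adj degrees reverse (cuthill_mckee_core_py n adj degrees reverse)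

-- ===== LEMMAS AND PROOFS =====

-- ---------- generic facts about PySem's stable insertion sort ----------

theorem pv_insertBy_all_lt (key : Int → Int) (x : Int) (l : List Int)
    (h : ∀ z ∈ l, key x < key z) :
    PySem.List.insertBy (fun a b => decide (key a < key b)) x l = x :: l := by
  cases l with
  | nil => simp [PySem.List.insertBy]
  | cons z t => simp [PySem.List.insertBy, h z List.mem_cons_self]

theorem pv_pairwise_insertBy (key : Int → Int) (x : Int) (l : List Int)
    (h : l.Pairwise (fun a b => key a ≤ key b)) :
    (PySem.List.insertBy (fun a b => decide (key a < key b)) x l).Pairwise (fun a b => key a ≤ key b) := by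
  induction l with
  | nil => simp [PySem.List.insertBy]
  | cons y t ih =>
    rcases List.pairwise_cons.mp h with ⟨hy, ht⟩
    by_cases hlt : key x < key y
    · simp only [PySem.List.insertBy, hlt, decide_true, if_true]
      refine List.pairwise_cons.mpr ⟨?_, h⟩
      intro z hz
      rcases List.mem_cons.mp hz with rfl | hz
      · exact le_of_lt hlt
      · exact le_trans (le_of_lt hlt) (hy z hz)
    · simp only [PySem.List.insertBy, hlt, decide_false, Bool.false_eq_true, if_false]
      refine List.pairwise_cons.mpr ⟨?_, ih ht⟩
      intro z hz
      rcases (PySem.List.mem_insertBy _ _ _ _).mp hz with rfl | hz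
      · omega
      · exact hy z hz

theorem pv_filter_insertBy (key : Int → Int) (p : Int → Bool) (x : Int) (l : List Int)
    (h : l.Pairwise (fun a b => key a ≤ key b)) :
    (PySem.List.insertBy (fun a b => decide (key a < key b)) x l).filter p
      = if p x then PySem.List.insertBy (fun a b => decide (key a < key b)) x (l.filter p)
        else l.filter p := by
  induction l with
  | nil => cases hp : p x <;> simp [PySem.List.insertBy, hp]
  | cons y t ih =>
    rcases List.pairwise_cons.mp h with ⟨hy, ht⟩
    by_cases hlt : key x < key y
    · have hins : PySem.List.insertBy (fun a b => decide (key a < key b)) x (y :: t) = x :: y :: t := by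
        simp [PySem.List.insertBy, hlt]
      rw [hins]
      cases hp : p x with
      | true =>
        cases hpy : p y with
        | true =>
          have h2 : PySem.List.insertBy (fun a b => decide (key a < key b)) x (y :: t.filter p)
              = x :: y :: t.filter p := by simp [PySem.List.insertBy, hlt]
          simp [hp, hpy, h2]
        | false =>
          have h2 : PySem.List.insertBy (fun a b => decide (key a < key b)) x (t.filter p)
              = x :: t.filter p :=
            pv_insertBy_all_lt key x _ (fun z hz => lt_of_lt_of_le hlt (hy z (List.mem_of_mem_filter hz)))
          simp [hp, hpy, h2]
      | false =>
        simp [List.filter_cons, hp]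
    · have hins : PySem.List.insertBy (fun a b => decide (key a < key b)) x (y :: t)
          = y :: PySem.List.insertBy (fun a b => decide (key a < key b)) x t := by
        simp [PySem.List.insertBy, hlt]
      rw [hins]
      cases hp : p x with
      | true =>
        cases hpy : p y with
        | true =>
          have h2 : PySem.List.insertBy (fun a b => decide (key a < key b)) x (y :: t.filter p)
              = y :: PySem.List.insertBy (fun a b => decide (key a < key b)) x (t.filter p) := by
            simp [PySem.List.insertBy, hlt]
          simp [hpy, ih ht, hp, h2]
        | false =>
          simp [hpy, ih ht, hp]
      | false =>
        cases hpy : p y <;> simp [hpy, ih ht, hp]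

theorem pv_foldl_ins_filter (key : Int → Int) (p : Int → Bool) (l : List Int) :
    ∀ acc : List Int, acc.Pairwise (fun a b => key a ≤ key b) →
    (l.foldl (fun acc x => PySem.List.insertBy (fun a b => decide (key a < key b)) x acc) acc).filter p
      = (l.filter p).foldl (fun acc x => PySem.List.insertBy (fun a b => decide (key a < key b)) x acc) (acc.filter p) := by
  induction l with
  | nil => intro acc _; simp
  | cons x t ih =>
    intro acc hacc
    rw [List.foldl_cons, ih _ (pv_pairwise_insertBy key x acc hacc),
        pv_filter_insertBy key p x acc hacc]
    cases hp : p x with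
    | true => simp [hp]
    | false => simp [hp]

-- stable sort commutes with filter
theorem pv_sorted_filter (key : Int → Int) (p : Int → Bool) (l : List Int) :
    (PySem.List.sorted l key).filter p = PySem.List.sorted (l.filter p) key := by
  rw [PySem.List.sorted_eq_foldl_insertBy, PySem.List.sorted_eq_foldl_insertBy]
  simpa using pv_foldl_ins_filter key p l [] (by simp)

-- min with key = head of the stable sort (first minimal element)
theorem pv_min_eq_head_sorted (key : Int → Int) (l : List Int) :
    PySem.List.min? l key = (PySem.List.sorted l key).head? := by
  induction l using List.reverseRecOn with
  | nil => rfl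
  | append_singleton l x ih =>
    have hsorted : PySem.List.sorted (l ++ [x]) key
        = PySem.List.insertBy (fun a b => decide (key a < key b)) x (PySem.List.sorted l key) := by
      rw [PySem.List.sorted_eq_foldl_insertBy, PySem.List.sorted_eq_foldl_insertBy, List.foldl_append]
      rfl
    cases hm : PySem.List.min? l key with
    | none =>
      have hl : l = [] := (PySem.List.min?_eq_none_iff l key).mp hm
      subst hl
      simp [PySem.List.min?, PySem.List.sorted, PySem.List.insertBy]
    | some m =>
      have hm' := hm
      unfold PySem.List.min? at hm'
      have hminx : PySem.List.min? (l ++ [x]) key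
          = if key x < key m then some x else some m := by
        unfold PySem.List.min?
        rw [List.foldl_append, hm']
        simp
      rw [hm] at ih
      cases hs : PySem.List.sorted l key with
      | nil => rw [hs] at ih; simp at ih
      | cons h0 t0 =>
        rw [hs] at ih
        simp only [List.head?_cons] at ih
        injection ih with e
        subst e
        rw [hminx, hsorted, hs]
        by_cases hlt : key x < key m
        · simp [PySem.List.insertBy, hlt]
        · simp [PySem.List.insertBy, hlt]

-- ---------- small set facts ----------

theorem pv_contains_iff (s : List Int) (x : Int) : PySem.Set.contains s x = true ↔ x ∈ s := by
  simp [PySem.Set.contains]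

theorem pv_mem_of_contains (s : List Int) (x : Int) (h : PySem.Set.contains s x = true) : x ∈ s :=
  (pv_contains_iff s x).mp h

theorem pv_not_mem_of_contains (s : List Int) (x : Int) (h : PySem.Set.contains s x = false) : x ∉ s :=
  fun hm => by rw [(pv_contains_iff s x).mpr hm] at h; cases h

theorem pv_contains_add (s : List Int) (v x : Int) :
    PySem.Set.contains (PySem.Set.add s v) x = (PySem.Set.contains s x || decide (x = v)) := by
  by_cases hx : x ∈ PySem.Set.add s v
  · have h1 : PySem.Set.contains (PySem.Set.add s v) x = true := (pv_contains_iff _ _).mpr hx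
    rcases (PySem.Set.mem_add ..).mp hx with h | h
    · rw [h1, (pv_contains_iff s x).mpr h]; simp
    · subst h; simp [hx]
  · have h1 : PySem.Set.contains (PySem.Set.add s v) x = false := by
      cases hc : PySem.Set.contains (PySem.Set.add s v) x
      · rfl
      · exact absurd ((pv_contains_iff _ _).mp hc) hx
    have h2 : x ∉ s := fun h => hx ((PySem.Set.mem_add ..).mpr (Or.inl h))
    have h3 : x ≠ v := fun h => hx ((PySem.Set.mem_add ..).mpr (Or.inr h))
    have h4 : PySem.Set.contains s x = false := by
      cases hc : PySem.Set.contains s x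
      · rfl
      · exact absurd ((pv_contains_iff _ _).mp hc) h2
    simp [hx, pv_not_mem_of_contains s x h4, h3]

theorem pv_contains_add_mono (s : List Int) (v x : Int)
    (h : PySem.Set.contains s x = true) : PySem.Set.contains (PySem.Set.add s v) x = true := by
  rw [pv_contains_add, h]; rfl

theorem pv_contains_update_mono (vs : List Int) :
    ∀ (s : List Int) (x : Int), PySem.Set.contains s x = true →
      PySem.Set.contains (PySem.Set.update s vs) x = true := by
  induction vs with
  | nil => intro s x h; exact h
  | cons v vs ih =>
    intro s x h
    exact ih _ x (pv_contains_add_mono s v x h)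

-- discarding vs from the complement of seen = the complement of (seen updated with vs)
theorem pv_discard_update (R : List Int) (vs : List Int) :
    ∀ seen : List Int,
      vs.foldl PySem.Set.discard (R.filter (fun i => !PySem.Set.contains seen i))
        = R.filter (fun i => !PySem.Set.contains (PySem.Set.update seen vs) i) := by
  induction vs with
  | nil => intro seen; simp [PySem.Set.update]
  | cons v vs ih =>
    intro seen
    rw [List.foldl_cons]
    have h1 : PySem.Set.discard (R.filter (fun i => !PySem.Set.contains seen i)) v
        = R.filter (fun i => !PySem.Set.contains (PySem.Set.add seen v) i) := by
      simp only [PySem.Set.discard, List.filter_filter]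
      apply List.filter_congr
      intro x _
      rw [pv_contains_add]
      cases hc : PySem.Set.contains seen x <;> by_cases hx : x = v <;> simp [hx, hc]
    rw [h1]
    have h2 : PySem.Set.update seen (v :: vs) = PySem.Set.update (PySem.Set.add seen v) vs := rfl
    rw [h2]
    exact ih (PySem.Set.add seen v)

-- set(xs) of a duplicate-free list is the list itself
theorem pv_foldl_add_of_nodup (l : List Int) :
    ∀ acc : List Int, l.Nodup → (∀ x ∈ l, x ∉ acc) →
      l.foldl PySem.Set.add acc = acc ++ l := by
  induction l with
  | nil => intro acc _ _; simp
  | cons x t ih =>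
    intro acc hnd hdisj
    rcases List.nodup_cons.mp hnd with ⟨hx, ht⟩
    have hmem : x ∉ acc := hdisj x List.mem_cons_self
    rw [List.foldl_cons]
    have : PySem.Set.add acc x = acc ++ [x] := by simp [PySem.Set.add, hmem]
    rw [this, ih (acc ++ [x]) ht]
    · simp
    · intro y hy
      simp only [List.mem_append, List.mem_singleton]
      rintro (h | rfl)
      · exact hdisj y (List.mem_cons_of_mem _ hy) h
      · exact hx hy

theorem pv_ofList_nodup (l : List Int) (h : l.Nodup) : PySem.Set.ofList l = l := by
  have := pv_foldl_add_of_nodup l [] h (by simp)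
  simpa [PySem.Set.ofList, PySem.Set.empty] using this

-- ---------- facts about A's inner loop (reused from the A-side analysis) ----------

theorem pvVisitA_len (vs : List Int) (st : List Int × List Int) :
    (pvVisitA st vs).1.length + (pvVisitA st vs).2.length ≤ st.1.length + st.2.length := by
  induction vs generalizing st with
  | nil => simp [pvVisitA]
  | cons v vs ih =>
    by_cases h : PySem.Set.contains st.1 v = true
    · have hm : v ∈ st.1 := by simpa [PySem.Set.contains] using h
      have hlt : (PySem.Set.discard st.1 v).length < st.1.length := by
        simp only [PySem.Set.discard]
        exact List.length_filter_lt_length_iff_exists.2 ⟨v, hm, by simp⟩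
      have step : pvVisitA st (v :: vs) = pvVisitA (PySem.Set.discard st.1 v, st.2 ++ [v]) vs := by
        simp only [pvVisitA, List.foldl_cons, h, if_true]
      rw [step]
      have := ih (PySem.Set.discard st.1 v, st.2 ++ [v])
      simp only [List.length_append, List.length_cons, List.length_nil] at this
      omega
    · have step : pvVisitA st (v :: vs) = pvVisitA st vs := by
        simp only [pvVisitA, List.foldl_cons, h, if_false, Bool.false_eq_true]
      rw [step]
      exact ih st

theorem pvVisitA_fst_le (vs : List Int) (st : List Int × List Int) :
    (pvVisitA st vs).1.length ≤ st.1.length := by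
  induction vs generalizing st with
  | nil => simp [pvVisitA]
  | cons v vs ih =>
    by_cases h : PySem.Set.contains st.1 v = true
    · have step : pvVisitA st (v :: vs) = pvVisitA (PySem.Set.discard st.1 v, st.2 ++ [v]) vs := by
        simp only [pvVisitA, List.foldl_cons, h, if_true]
      rw [step]
      calc (pvVisitA (PySem.Set.discard st.1 v, st.2 ++ [v]) vs).1.length
          ≤ (PySem.Set.discard st.1 v).length := ih _
        _ ≤ st.1.length := by simp only [PySem.Set.discard]; exact List.length_filter_le _ _
    · have step : pvVisitA st (v :: vs) = pvVisitA st vs := by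
        simp only [pvVisitA, List.foldl_cons, h, if_false, Bool.false_eq_true]
      rw [step]
      exact ih st

theorem pvBFSA_uv_le (adj : List (Int × List Int)) (degrees : List (Int × Int)) (f : Nat) :
    ∀ (q uv perm : List Int), (pvBFSA adj degrees f q uv perm).2.length ≤ uv.length := by
  induction f with
  | zero => intro q uv perm; cases q <;> simp [pvBFSA]
  | succ f ih =>
    intro q uv perm
    cases q with
    | nil => simp [pvBFSA]
    | cons u qs =>
      rw [pvBFSA]
      calc (pvBFSA adj degrees f (pvVisitA (uv, qs) (PySem.List.sorted ((pvAdj adj u).filter (fun v => PySem.Set.contains uv v)) (fun i => pvDeg degrees i))).2 (pvVisitA (uv, qs) (PySem.List.sorted ((pvAdj adj u).filter (fun v => PySem.Set.contains uv v)) (fun i => pvDeg degrees i))).1 (perm ++ [u])).2.length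
          ≤ (pvVisitA (uv, qs) (PySem.List.sorted ((pvAdj adj u).filter (fun v => PySem.Set.contains uv v)) (fun i => pvDeg degrees i))).1.length := ih _ _ _
        _ ≤ uv.length := pvVisitA_fst_le _ _

theorem pvAdj_nodup (adj : List (Int × List Int)) (u : Int)
    (hadj : ∀ p ∈ adj, p.2.Nodup) : (pvAdj adj u).Nodup := by
  unfold pvAdj PySem.Dict.getD PySem.Dict.get?
  cases hf : List.find? (fun p => p.1 == u) (PySem.Dict.mk adj).items with
  | none => simp
  | some p =>
    simp only [Option.map_some, Option.getD_some]
    exact hadj p (List.mem_of_find?_eq_some hf)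

theorem pv_ns_sub (adj : List (Int × List Int)) (degrees : List (Int × Int)) (uv : List Int) (u : Int) :
    ∀ v ∈ PySem.List.sorted ((pvAdj adj u).filter (fun v => PySem.Set.contains uv v)) (fun i => pvDeg degrees i), v ∈ uv := by
  intro v hv
  rw [PySem.List.mem_sorted] at hv
  have := (List.mem_filter.mp hv).2
  simpa [PySem.Set.contains] using this

theorem pv_ns_nodup (adj : List (Int × List Int)) (degrees : List (Int × Int)) (uv : List Int) (u : Int)
    (hadj : ∀ p ∈ adj, p.2.Nodup) :
    (PySem.List.sorted ((pvAdj adj u).filter (fun v => PySem.Set.contains uv v)) (fun i => pvDeg degrees i)).Nodup := by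
  exact ((PySem.List.sorted_perm _ _ _).nodup_iff).mpr ((pvAdj_nodup adj u hadj).filter _)

-- A's guarded per-neighbor loop = remove-all-then-append, for a nodup unvisited neighbor list
theorem pvVisitA_eq (vs uv q : List Int) (hnd : vs.Nodup) (hsub : ∀ v ∈ vs, v ∈ uv) :
    pvVisitA (uv, q) vs = (vs.foldl PySem.Set.discard uv, q ++ vs) := by
  induction vs generalizing uv q with
  | nil => simp [pvVisitA]
  | cons v vs ih =>
    have hc : PySem.Set.contains uv v = true := by
      simp only [PySem.Set.contains]
      simpa using hsub v (List.mem_cons_self)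
    have step : pvVisitA (uv, q) (v :: vs) = pvVisitA (PySem.Set.discard uv v, q ++ [v]) vs := by
      simp only [pvVisitA, List.foldl_cons, hc, if_true]
    rw [step, ih _ _ (List.nodup_cons.mp hnd).2]
    · simp
    · intro v' hv'
      simp only [PySem.Set.discard, List.mem_filter]
      refine ⟨hsub v' (List.mem_cons_of_mem _ hv'), ?_⟩
      have : v' ≠ v := fun e => (List.nodup_cons.mp hnd).1 (e ▸ hv')
      simpa using this

theorem pv_discard_fold_len (vs uv : List Int) (hnd : vs.Nodup) (hsub : ∀ v ∈ vs, v ∈ uv) :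
    (vs.foldl PySem.Set.discard uv).length + vs.length ≤ uv.length := by
  have h1 := pvVisitA_eq vs uv [] hnd hsub
  have h2 := pvVisitA_len vs (uv, [])
  rw [h1] at h2
  simpa using h2

-- ---------- B's precomputed table looked up = sort of the range-filtered adjacency list ----------

theorem pv_nbr_lookup (n : Int) (adj : List (Int × List Int)) (degrees : List (Int × Int)) (u : Int) :
    pvNbrGet (pvNbrTab n adj degrees) u
      = PySem.List.sorted ((pvAdj adj u).filter (fun v => decide (0 ≤ v) && decide (v < n)))
          (fun i => pvDeg degrees i) := by
  induction adj with
  | nil => rfl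
  | cons p t ih =>
    by_cases h : p.1 == u
    · simp [pvNbrGet, pvNbrTab, pvAdj, PySem.Dict.getD, PySem.Dict.get?, h]
    · simp only [pvNbrGet, pvNbrTab, pvAdj, PySem.Dict.getD, PySem.Dict.get?, List.map_cons,
        List.find?_cons] at ih ⊢
      simp only [h]
      simpa [pvNbrGet, pvNbrTab, pvAdj, PySem.Dict.getD, PySem.Dict.get?] using ih

-- B's fresh list = A's sorted unvisited-neighbor list, when unvisited = complement of seen
theorem pv_fresh_eq_ns (n : Int) (adj : List (Int × List Int)) (degrees : List (Int × Int))
    (seen : List Int) (u : Int) :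
    (pvNbrGet (pvNbrTab n adj degrees) u).filter (fun v => !PySem.Set.contains seen v)
      = PySem.List.sorted ((pvAdj adj u).filter
          (fun v => PySem.Set.contains ((PySem.List.pyRange 0 n 1).filter (fun i => !PySem.Set.contains seen i)) v))
          (fun i => pvDeg degrees i) := by
  rw [pv_nbr_lookup, pv_sorted_filter, List.filter_filter]
  congr 1
  apply List.filter_congr
  intro v _
  by_cases hv : v ∈ (PySem.List.pyRange 0 n 1).filter (fun i => !PySem.Set.contains seen i)
  · have h1 := List.mem_filter.mp hv
    have h2 := PySem.List.mem_pyRange_one.mp h1.1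
    simp [(pv_contains_iff _ _).mpr hv, h2.1, h2.2]
  · have h1 : PySem.Set.contains ((PySem.List.pyRange 0 n 1).filter (fun i => !PySem.Set.contains seen i)) v = false := by
      cases hc : PySem.Set.contains ((PySem.List.pyRange 0 n 1).filter (fun i => !PySem.Set.contains seen i)) v
      · rfl
      · exact absurd ((pv_contains_iff _ _).mp hc) hv
    rw [h1]
    cases hs : PySem.Set.contains seen v
    · by_cases h0 : (0 : Int) ≤ v
      · by_cases h2 : v < n
        · exact absurd (List.mem_filter.mpr ⟨PySem.List.mem_pyRange_one.mpr ⟨h0, h2⟩, by rw [hs]; rfl⟩) hv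
        · simp [h2]
      · simp [h0]
    · simp

-- ---------- the two BFS loops agree ----------

theorem pv_bfs_eq (n : Int) (adj : List (Int × List Int)) (degrees : List (Int × Int))
    (hadj : ∀ p ∈ adj, p.2.Nodup) :
    ∀ (fA : Nat) (fB : Nat) (q seen uv out : List Int),
      uv = (PySem.List.pyRange 0 n 1).filter (fun i => !PySem.Set.contains seen i) →
      q.length + uv.length < fA → q.length + uv.length < fB →
      (pvBFSA adj degrees fA q uv out).1 = (pvBFS_B (pvNbrTab n adj degrees) fB q seen out).1
      ∧ (pvBFSA adj degrees fA q uv out).2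
          = (PySem.List.pyRange 0 n 1).filter (fun i => !PySem.Set.contains (pvBFS_B (pvNbrTab n adj degrees) fB q seen out).2 i)
      ∧ (∀ x, PySem.Set.contains seen x = true →
          PySem.Set.contains (pvBFS_B (pvNbrTab n adj degrees) fB q seen out).2 x = true) := by
  intro fA
  induction fA with
  | zero => intro fB q seen uv out _ hfA _; omega
  | succ fa ih =>
    intro fB q seen uv out huv hfA hfB
    cases q with
    | nil =>
      cases fB with
      | zero => omega
      | succ fb => exact ⟨rfl, huv, fun x h => h⟩
    | cons u rest =>
      cases fB with
      | zero => omega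
      | succ fb =>
        have hns : (pvNbrGet (pvNbrTab n adj degrees) u).filter (fun v => !PySem.Set.contains seen v)
            = PySem.List.sorted ((pvAdj adj u).filter (fun v => PySem.Set.contains uv v)) (fun i => pvDeg degrees i) := by
          rw [huv]; exact pv_fresh_eq_ns n adj degrees seen u
        have hAstep : pvBFSA adj degrees (fa + 1) (u :: rest) uv out
            = pvBFSA adj degrees fa
                (rest ++ PySem.List.sorted ((pvAdj adj u).filter (fun v => PySem.Set.contains uv v)) (fun i => pvDeg degrees i))
                ((PySem.List.sorted ((pvAdj adj u).filter (fun v => PySem.Set.contains uv v)) (fun i => pvDeg degrees i)).foldl PySem.Set.discard uv)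
                (out ++ [u]) := by
          rw [pvBFSA]
          rw [pvVisitA_eq _ _ _ (pv_ns_nodup adj degrees uv u hadj) (pv_ns_sub adj degrees uv u)]
        have hBstep : pvBFS_B (pvNbrTab n adj degrees) (fb + 1) (u :: rest) seen out
            = pvBFS_B (pvNbrTab n adj degrees) fb
                (rest ++ (pvNbrGet (pvNbrTab n adj degrees) u).filter (fun v => !PySem.Set.contains seen v))
                (PySem.Set.update seen ((pvNbrGet (pvNbrTab n adj degrees) u).filter (fun v => !PySem.Set.contains seen v)))
                (out ++ [u]) := by
          rw [pvBFS_B]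
        set ns := PySem.List.sorted ((pvAdj adj u).filter (fun v => PySem.Set.contains uv v)) (fun i => pvDeg degrees i) with hns_def
        have huv' : ns.foldl PySem.Set.discard uv
            = (PySem.List.pyRange 0 n 1).filter (fun i => !PySem.Set.contains (PySem.Set.update seen ns) i) := by
          rw [huv]
          exact pv_discard_update (PySem.List.pyRange 0 n 1) ns seen
        have hlen := pv_discard_fold_len ns uv (pv_ns_nodup adj degrees uv u hadj) (pv_ns_sub adj degrees uv u)
        have h1 : (rest ++ ns).length + (ns.foldl PySem.Set.discard uv).length < fa := by
          simp only [List.length_append, List.length_cons] at hfA ⊢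
          omega
        have h2 : (rest ++ ns).length + (ns.foldl PySem.Set.discard uv).length < fb := by
          simp only [List.length_append, List.length_cons] at hfB ⊢
          omega
        have hrec := ih fb (rest ++ ns) (PySem.Set.update seen ns) (ns.foldl PySem.Set.discard uv) (out ++ [u]) huv' h1 h2
        rw [hAstep, hBstep, hns]
        exact ⟨hrec.1, hrec.2.1, fun x hx => hrec.2.2 x (pv_contains_update_mono ns seen x hx)⟩

-- ---------- A's outer while-loop = B's scan of the degree-sorted start list ----------

theorem pv_outer_eq (n : Int) (adj : List (Int × List Int)) (degrees : List (Int × Int))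
    (hadj : ∀ p ∈ adj, p.2.Nodup) :
    ∀ (starts : List Int) (fA fB : Nat) (seen uv out : List Int),
      uv = (PySem.List.pyRange 0 n 1).filter (fun i => !PySem.Set.contains seen i) →
      starts.filter (fun s => !PySem.Set.contains seen s) = PySem.List.sorted uv (fun i => pvDeg degrees i) →
      uv.length ≤ fA → uv.length < fB →
      pvOuterA adj degrees fA uv out = pvStartsLoop (pvNbrTab n adj degrees) fB starts seen out := by
  intro starts
  induction starts with
  | nil =>
    intro fA fB seen uv out huv hinv hfA hfB
    have huv0 : uv = [] := by
      have := hinv.symm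
      simp only [List.filter_nil] at this
      exact (PySem.List.sorted_eq_nil_iff uv _ false).mp this
    subst huv0
    cases fA with
    | zero => rfl
    | succ f =>
      have : PySem.List.min? ([] : List Int) (fun i => pvDeg degrees i) = none := rfl
      simp [pvOuterA, this, pvStartsLoop]
  | cons s rest ih =>
    intro fA fB seen uv out huv hinv hfA hfB
    by_cases hs : PySem.Set.contains seen s = true
    · have hfilter : (s :: rest).filter (fun s => !PySem.Set.contains seen s)
          = rest.filter (fun s => !PySem.Set.contains seen s) := by
        simp [pv_mem_of_contains seen s hs]
      rw [hfilter] at hinv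
      rw [pvStartsLoop, if_pos hs]
      exact ih fA fB seen uv out huv hinv hfA hfB
    · have hsb : PySem.Set.contains seen s = false := by
        cases hc : PySem.Set.contains seen s
        · rfl
        · exact absurd hc hs
      have hinv' : s :: rest.filter (fun s => !PySem.Set.contains seen s)
          = PySem.List.sorted uv (fun i => pvDeg degrees i) := by
        rw [← hinv]; simp [pv_not_mem_of_contains seen s hsb]
      have hmin : PySem.List.min? uv (fun i => pvDeg degrees i) = some s := by
        rw [pv_min_eq_head_sorted, ← hinv']
        rfl
      have hsuv : s ∈ uv := PySem.List.min?_mem hmin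
      have huvpos : 1 ≤ uv.length := List.length_pos_of_mem hsuv
      cases fA with
      | zero => omega
      | succ f =>
        rw [pvOuterA, hmin]
        rw [pvStartsLoop, if_neg hs]
        simp only
        -- relate uv1 to the complement of (add seen s)
        have huv1 : PySem.Set.discard uv s
            = (PySem.List.pyRange 0 n 1).filter (fun i => !PySem.Set.contains (PySem.Set.add seen s) i) := by
          have := pv_discard_update (PySem.List.pyRange 0 n 1) [s] seen
          simpa [PySem.Set.update, huv] using this
        have huv1len : (PySem.Set.discard uv s).length < uv.length := by
          simp only [PySem.Set.discard]
          exact List.length_filter_lt_length_iff_exists.2 ⟨s, hsuv, by simp⟩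
        have hb1 : ([s] : List Int).length + (PySem.Set.discard uv s).length < (PySem.Set.discard uv s).length + 2 := by
          simp only [List.length_cons, List.length_nil]
          omega
        have hb2 : ([s] : List Int).length + (PySem.Set.discard uv s).length < fB := by
          simp only [List.length_cons, List.length_nil]
          omega
        have hbfs := pv_bfs_eq n adj degrees hadj ((PySem.Set.discard uv s).length + 2) fB
          [s] (PySem.Set.add seen s) (PySem.Set.discard uv s) out huv1 hb1 hb2
        set ra := pvBFSA adj degrees ((PySem.Set.discard uv s).length + 2) [s] (PySem.Set.discard uv s) out with hra
        set rb := pvBFS_B (pvNbrTab n adj degrees) fB [s] (PySem.Set.add seen s) out with hrb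
        -- seen grows monotonically through the component
        have hmono : ∀ x, PySem.Set.contains seen x = true → PySem.Set.contains rb.2 x = true :=
          fun x hx => hbfs.2.2 x (pv_contains_add_mono seen s x hx)
        have hsseen : PySem.Set.contains rb.2 s = true := by
          apply hbfs.2.2
          rw [pv_contains_add]
          simp
        -- uv2 as a filter of uv
        have huv2 : ra.2 = uv.filter (fun i => !PySem.Set.contains rb.2 i) := by
          rw [hbfs.2.1, huv, List.filter_filter]
          apply List.filter_congr
          intro x _
          cases hc : PySem.Set.contains rb.2 x
          · cases hc' : PySem.Set.contains seen x
            · simp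
            · exact absurd (hmono x hc') (by intro h; rw [h] at hc; cases hc)
          · simp
        -- the invariant for the remaining starts
        have hinv2 : rest.filter (fun t => !PySem.Set.contains rb.2 t)
            = PySem.List.sorted ra.2 (fun i => pvDeg degrees i) := by
          rw [huv2, ← pv_sorted_filter, ← hinv']
          simp only [List.filter_cons, hsseen, Bool.not_true, Bool.false_eq_true, if_false,
            List.filter_filter]
          apply List.filter_congr
          intro x _
          cases hc : PySem.Set.contains rb.2 x
          · cases hc' : PySem.Set.contains seen x
            · simp
            · exact absurd (hmono x hc') (by intro h; rw [h] at hc; cases hc)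
          · simp
        have hlen2 : ra.2.length ≤ (PySem.Set.discard uv s).length := pvBFSA_uv_le _ _ _ _ _ _
        rw [hbfs.1]
        exact ih f fB rb.2 ra.2 rb.1 hbfs.2.1 hinv2 (by omega) (by omega)

-- ===== VERDICT (by name: the statement is the Claim_ definition above) =====
theorem cuthill_mckee_core_py_spec : Claim_equal_cuthill_mckee_core_py := by
  intro n adj degrees reverse _ hpre
  unfold Spec_cuthill_mckee_core_py cuthill_mckee_core_py cuthill_mckee_core_py_alt
  have hR : PySem.Set.ofList (PySem.List.pyRange 0 n 1) = PySem.List.pyRange 0 n 1 :=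
    pv_ofList_nodup _ (PySem.List.nodup_pyRange_one 0 n)
  have hfilter : (PySem.List.pyRange 0 n 1).filter (fun i => !PySem.Set.contains ([] : List Int) i)
      = PySem.List.pyRange 0 n 1 := by
    apply List.filter_eq_self.mpr
    intro x _
    rfl
  have hlen : (PySem.List.pyRange 0 n 1).length = n.toNat := by
    rw [PySem.List.length_pyRange_one]
    omega
  have h := pv_outer_eq n adj degrees hpre.2
    (PySem.List.sorted (PySem.List.pyRange 0 n 1) (fun i => pvDeg degrees i))
    (PySem.List.pyRange 0 n 1).length (n.toNat + 1) [] (PySem.List.pyRange 0 n 1) []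
    hfilter.symm
    (by apply List.filter_eq_self.mpr; intro x _; rfl)
    le_rfl
    (by omega)
  rw [hR]
  simp only [h]
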